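-- pv_equiv track=rewrite | github.com/INFINITY-0694/ShadowNet | server/incident_engine.py | calculate_agent_risk
-- ===== SOURCE A (Python) =====
-- SEVERITY_WEIGHTS = {
--     "LOW":      10,
--     "MEDIUM":   25,
--     "HIGH":     50,
--     "CRITICAL": 80
-- }
--
-- def calculate_agent_risk(agent_alias, incidents):
--     """
--     Calculate risk score based on open incidents.
--     Score accumulates by severity weight.
--     Returns (score, level) tuple.
--     """
--     score = 0
--     for incident in incidents:
--         if incident['status'] == 'open':
--             score += SEVERITY_WEIGHTS.get(incident['severity'], 0)
--
--     if score >= 100: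
--         level = "CRITICAL"
--     elif score >= 60:
--         level = "HIGH"
--     elif score >= 30:
--         level = "MEDIUM"
--     elif score > 0:
--         level = "LOW"
--     else:
--         level = "SAFE"
--
--     return score, level
-- ===== SOURCE B (Python) =====
-- SEVERITY_WEIGHTS = {
--     "LOW":      10,
--     "MEDIUM":   25,
--     "HIGH":     50,
--     "CRITICAL": 80
-- }
--
-- _LEVEL_TABLE = [(100, "CRITICAL"), (60, "HIGH"), (30, "MEDIUM"), (1, "LOW")]
--
-- def calculate_agent_risk(agent_alias, incidents):
--     # Tally open incidents by severity, then weight each distinct severity once.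
--     counts = {}
--     for incident in incidents:
--         if incident['status'] == 'open':
--             sev = incident['severity']
--             counts[sev] = counts.get(sev, 0) + 1
--     score = sum(SEVERITY_WEIGHTS.get(sev, 0) * n for sev, n in counts.items())
--     level = next((lbl for t, lbl in _LEVEL_TABLE if score >= t), "SAFE")
--     return score, level
-- ===== Notes on version B (the rewrite author's own statement) =====
-- stated objective: alternative
-- what changed: B tallies open incidents into a severity->count dict in one pass, computes the score as a weighted sum over the distinct severities, and picks the level by scanning a threshold table instead of the if-elif cascade.
import Mathlib
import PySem

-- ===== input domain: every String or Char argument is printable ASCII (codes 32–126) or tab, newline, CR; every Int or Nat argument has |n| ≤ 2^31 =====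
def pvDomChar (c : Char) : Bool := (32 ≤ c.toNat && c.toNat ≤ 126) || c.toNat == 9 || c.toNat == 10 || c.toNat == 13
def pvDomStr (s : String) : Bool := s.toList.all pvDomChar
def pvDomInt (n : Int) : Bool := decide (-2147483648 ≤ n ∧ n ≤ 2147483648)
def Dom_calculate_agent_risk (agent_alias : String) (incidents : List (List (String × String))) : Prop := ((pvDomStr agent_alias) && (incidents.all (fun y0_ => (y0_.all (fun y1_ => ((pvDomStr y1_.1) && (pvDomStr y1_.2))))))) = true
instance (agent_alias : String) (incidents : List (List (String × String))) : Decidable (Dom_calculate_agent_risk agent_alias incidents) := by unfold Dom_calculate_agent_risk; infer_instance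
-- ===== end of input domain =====

-- B tallies open incidents into a severity->count dict, weights each distinct severity once,
-- and picks the level from a threshold table instead of the if-elif cascade (alternative decomposition, same cost).

-- ===== PORT A =====
def pySEVERITY_WEIGHTS : PySem.Dict String Int :=
  PySem.Dict.ofList [("LOW", 10), ("MEDIUM", 25), ("HIGH", 50), ("CRITICAL", 80)]

def calculate_agent_risk (agent_alias : String) (incidents : List (List (String × String))) : Int × String :=
  let score : Int := incidents.foldl (fun score incident =>
    match (PySem.Dict.mk incident).get? "status" with
    | some st =>
        if st == "open" then
          match (PySem.Dict.mk incident).get? "severity" with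
          | some sev => score + pySEVERITY_WEIGHTS.getD sev 0
          | none => score   -- KeyError in Python; excluded by Pre_
        else score
    | none => score          -- KeyError in Python; excluded by Pre_
    ) 0
  let level : String :=
    if score ≥ 100 then "CRITICAL"
    else if score ≥ 60 then "HIGH"
    else if score ≥ 30 then "MEDIUM"
    else if score > 0 then "LOW"
    else "SAFE"
  (score, level)

-- ===== PORT B =====
def pvLevelTable : List (Int × String) := [(100, "CRITICAL"), (60, "HIGH"), (30, "MEDIUM"), (1, "LOW")]

def calculate_agent_risk_alt (agent_alias : String) (incidents : List (List (String × String))) : Int × String :=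
  let counts : PySem.Dict String Int := incidents.foldl (fun d incident =>
    match (PySem.Dict.mk incident).get? "status" with
    | some st =>
        if st == "open" then
          match (PySem.Dict.mk incident).get? "severity" with
          | some sev => d.insert sev (d.getD sev 0 + 1)
          | none => d   -- KeyError in Python; excluded by Pre_
        else d
    | none => d          -- KeyError in Python; excluded by Pre_
    ) PySem.Dict.empty
  let score : Int := counts.items.foldl (fun acc p => acc + pySEVERITY_WEIGHTS.getD p.1 0 * p.2) 0
  let level : String := ((pvLevelTable.find? (fun p => decide (score ≥ p.1))).map Prod.snd).getD "SAFE"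
  (score, level)

-- ===== PRECONDITION & SPEC =====
-- Pre_ excludes exactly the incident dicts on which Python A raises KeyError:
-- a missing 'status' key, or status 'open' with a missing 'severity' key.
def Pre_calculate_agent_risk (agent_alias : String) (incidents : List (List (String × String))) : Prop :=
  incidents.all (fun inc =>
    (PySem.Dict.mk inc).contains "status" &&
    (!((PySem.Dict.mk inc).get? "status" == some "open") || (PySem.Dict.mk inc).contains "severity")) = true
instance (agent_alias : String) (incidents : List (List (String × String))) : Decidable (Pre_calculate_agent_risk agent_alias incidents) := by unfold Pre_calculate_agent_risk; infer_instance

def pvWitness_calculate_agent_risk : String × (List (List (String × String))) :=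
  ("agent7", [[("status", "open"), ("severity", "HIGH")], [("status", "closed"), ("severity", "LOW")]])

def Spec_calculate_agent_risk (agent_alias : String) (incidents : List (List (String × String))) (out : Int × String) : Prop := out = calculate_agent_risk_alt agent_alias incidents
instance (agent_alias : String) (incidents : List (List (String × String))) (out : Int × String) : Decidable (Spec_calculate_agent_risk agent_alias incidents out) := by unfold Spec_calculate_agent_risk; infer_instance

-- ===== CLAIM (what is proved, stated in full; the proofs are below) =====
def Claim_equal_calculate_agent_risk : Prop := ∀ (agent_alias : String) (incidents : List (List (String × String))), Dom_calculate_agent_risk agent_alias incidents → Pre_calculate_agent_risk agent_alias incidents → Spec_calculate_agent_risk agent_alias incidents (calculate_agent_risk agent_alias incidents)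

-- ===== LEMMAS AND PROOFS =====

-- weight of a severity key
def pvW (s : String) : Int := pySEVERITY_WEIGHTS.getD s 0

-- weighted sum of a counts items list
def pvS (l : List (String × Int)) : Int := (l.map (fun p => pvW p.1 * p.2)).sum

theorem pv_foldl_S (l : List (String × Int)) (a : Int) :
    l.foldl (fun acc p => acc + pySEVERITY_WEIGHTS.getD p.1 0 * p.2) a = a + pvS l := by
  induction l generalizing a with
  | nil => simp [pvS]
  | cons p rest ih => simp [pvS, pvW, ih, List.foldl_cons]; ring

theorem pv_S_map_bump (x : String) (v : Int) (l : List (String × Int))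
    (hnd : (l.map Prod.fst).Nodup) (hmem : (x, v) ∈ l) :
    pvS (l.map (fun p => if p.1 == x then (x, v + 1) else p)) = pvS l + pvW x := by
  induction l with
  | nil => simp at hmem
  | cons p rest ih =>
    simp only [List.map_cons, List.nodup_cons] at hnd
    rcases List.mem_cons.mp hmem with h | h
    · subst h
      have hrest : ∀ q ∈ rest, (fun p => if p.1 == x then (x, v + 1) else p) q = q := by
        intro q hq
        have : q.1 ≠ x := by
          intro he; exact hnd.1 (he ▸ List.mem_map.mpr ⟨q, hq, rfl⟩)
        simp [this]
      simp only [List.map_cons, beq_self_eq_true, if_pos rfl]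
      rw [List.map_congr_left hrest, List.map_id']
      simp [pvS]; ring
    · have hx : x ∈ rest.map Prod.fst := List.mem_map.mpr ⟨(x, v), h, rfl⟩
      have hp1 : p.1 ≠ x := by intro he; exact hnd.1 (he ▸ hx)
      simp only [List.map_cons, hp1, beq_iff_eq, if_neg hp1]
      have := ih hnd.2 h
      simp [pvS] at this ⊢
      omega

theorem pv_S_insert (d : PySem.Dict String Int) (x : String) (hnd : d.keys.Nodup) :
    pvS ((d.insert x (d.getD x 0 + 1)).items) = pvS d.items + pvW x := by
  by_cases hc : d.contains x = true
  · have hsome : (d.get? x).isSome := by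
      rw [← PySem.Dict.contains_eq_isSome_get?]; exact hc
    obtain ⟨v, hv⟩ := Option.isSome_iff_exists.mp hsome
    have hgd : d.getD x 0 = v := PySem.Dict.getD_of_get?_eq_some d 0 hv
    have hmem : (x, v) ∈ d.items := PySem.Dict.mem_items_of_get?_eq_some d hv
    rw [PySem.Dict.items_insert_of_contains d _ hc, hgd]
    exact pv_S_map_bump x v d.items (by simpa [PySem.Dict.keys] using hnd) hmem
  · have hcf : d.contains x = false := by simpa using hc
    rw [PySem.Dict.items_insert, hcf, PySem.Dict.getD_of_not_contains d 0 hcf]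
    simp [pvS]

theorem pv_invariant (incidents : List (List (String × String))) (d : PySem.Dict String Int)
    (hnd : d.keys.Nodup) :
    pvS ((incidents.foldl (fun d incident =>
      match (PySem.Dict.mk incident).get? "status" with
      | some st =>
          if st == "open" then
            match (PySem.Dict.mk incident).get? "severity" with
            | some sev => d.insert sev (d.getD sev 0 + 1)
            | none => d
          else d
      | none => d) d).items) =
    incidents.foldl (fun score incident =>
      match (PySem.Dict.mk incident).get? "status" with
      | some st =>
          if st == "open" then
            match (PySem.Dict.mk incident).get? "severity" with
            | some sev => score + pySEVERITY_WEIGHTS.getD sev 0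
            | none => score
          else score
      | none => score) (pvS d.items) := by
  induction incidents generalizing d with
  | nil => simp
  | cons inc rest ih =>
    simp only [List.foldl_cons]
    cases hst : (PySem.Dict.mk inc).get? "status" with
    | none => exact ih d hnd
    | some st =>
      by_cases ho : st == "open"
      · simp only [ho, if_true]
        cases hsev : (PySem.Dict.mk inc).get? "severity" with
        | none => exact ih d hnd
        | some sev =>
          rw [ih _ (PySem.Dict.nodup_keys_insert _ _ _ hnd), pv_S_insert d sev hnd]
          rfl
      · simp only [ho, if_false]
        exact ih d hnd

theorem pv_level_eq (n : Int) :
    ((pvLevelTable.find? (fun p => decide (n ≥ p.1))).map Prod.snd).getD "SAFE" =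
    (if n ≥ 100 then "CRITICAL"
     else if n ≥ 60 then "HIGH"
     else if n ≥ 30 then "MEDIUM"
     else if n > 0 then "LOW"
     else "SAFE") := by
  by_cases h1 : n ≥ 100
  · simp [pvLevelTable, List.find?, h1]
  · by_cases h2 : n ≥ 60
    · simp [pvLevelTable, List.find?, h1, h2]
    · by_cases h3 : n ≥ 30
      · simp [pvLevelTable, List.find?, h1, h2, h3]
      · by_cases h4 : n ≥ 1
        · simp [pvLevelTable, List.find?, h1, h2, h3, h4, show n > 0 by omega]
        · simp [pvLevelTable, List.find?, h1, h2, h3, h4, show ¬ n > 0 by omega]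

-- ===== VERDICT (by name: the statement is the Claim_ definition above) =====
theorem calculate_agent_risk_spec : Claim_equal_calculate_agent_risk := by
  intro agent_alias incidents _ _
  unfold Spec_calculate_agent_risk calculate_agent_risk calculate_agent_risk_alt
  have hscore := pv_invariant incidents PySem.Dict.empty (by simp)
  have h0 : pvS (PySem.Dict.empty : PySem.Dict String Int).items = 0 := rfl
  rw [h0] at hscore
  dsimp only
  rw [pv_foldl_S, zero_add, hscore, pv_level_eq]
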